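-- pv_equiv track=rewrite | github.com/Reicher/AdventOfCode2019 | day16/main.py | getP
-- ===== SOURCE A (Python) =====
-- def getP(pattern, output, part, size):
--     newPattern = []
--     while 1:
--         for p in pattern:
--             for i in range(output+1):
--                 newPattern.append(p)
--                 if len(newPattern) > part:
--                     return newPattern[part]
--
-- pattern = [0, 1, 0, -1]
-- ===== SOURCE B (Python) =====
-- def getP(pattern, output, part, size):
--     # Closed form: the expanded FFT pattern repeats each element output+1
--     # times, cyclically; index arithmetic replaces building the list.
--     return pattern[(part // (output + 1)) % len(pattern)]
-- ===== Notes on version B (the rewrite author's own statement) =====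
-- stated objective: simpler
-- what changed: Replaces A's loop that materialises the repeated pattern element by element until index part is reached with a closed-form modular index pattern[(part // (output+1)) % len(pattern)].
-- intended difference: For part = -1 A returns pattern[0] by Python negative-index wraparound on a one-element buffer, while B's modular formula returns pattern[-1 % len] = pattern[len-1], the value of the periodic pattern extended to index -1, which is the intended periodic rule. — e.g. on getP([0, 1, 0, -1], 0, -1, 0): A returns 0, B returns -1
import Mathlib
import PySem

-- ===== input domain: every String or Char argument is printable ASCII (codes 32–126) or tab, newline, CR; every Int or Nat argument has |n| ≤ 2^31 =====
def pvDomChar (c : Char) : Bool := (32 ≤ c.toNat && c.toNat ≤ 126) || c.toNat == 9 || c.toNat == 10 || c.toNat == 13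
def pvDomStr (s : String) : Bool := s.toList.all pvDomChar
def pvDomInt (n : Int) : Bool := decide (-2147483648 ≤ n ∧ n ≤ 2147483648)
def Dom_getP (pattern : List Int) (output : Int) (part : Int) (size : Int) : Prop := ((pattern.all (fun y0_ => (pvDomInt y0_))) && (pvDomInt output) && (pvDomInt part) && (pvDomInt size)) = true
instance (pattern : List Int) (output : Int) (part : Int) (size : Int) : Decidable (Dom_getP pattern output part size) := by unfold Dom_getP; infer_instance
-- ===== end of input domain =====

-- B replaces A's element-by-element expansion loop with a one-line closed-form modular index.
-- ===== PORT A =====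
-- inner 'for i in range(output+1)' loop: appends p, returns newPattern[part] once len > part
def getPInner (p part : Int) (acc : List Int) : Nat → Sum (List Int) Int
  | 0 => Sum.inl acc
  | n + 1 =>
    let acc' := acc ++ [p]
    if (acc'.length : Int) > part then
      Sum.inr ((PySem.List.pyGet? acc' part).getD 0)  -- none = IndexError, excluded by Pre_
    else getPInner p part acc' n

-- middle 'for p in pattern' loop
def getPMid (part output : Int) : List Int → List Int → Sum (List Int) Int
  | acc, [] => Sum.inl acc
  | acc, p :: ps =>
    match getPInner p part acc (output + 1).toNat with
    | Sum.inl acc' => getPMid part output acc' ps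
    | Sum.inr v => Sum.inr v

-- outer 'while 1' loop, with fuel: Python diverges exactly where the fuel can run out (outside Pre_)
def getPOuter (pattern : List Int) (output part : Int) (acc : List Int) : Nat → Int
  | 0 => 0
  | fuel + 1 =>
    match getPMid part output acc pattern with
    | Sum.inl acc' => getPOuter pattern output part acc' fuel
    | Sum.inr v => v

def getP (pattern : List Int) (output : Int) (part : Int) (size : Int) : Int :=
  getPOuter pattern output part [] (part.toNat + 2)

-- ===== PORT B =====
def getP_alt (pattern : List Int) (output : Int) (part : Int) (size : Int) : Int :=
  (PySem.List.pyGet? pattern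
    (PySem.Int.mod (PySem.Int.floordiv part (output + 1)) (pattern.length : Int))).getD 0

-- ===== PRECONDITION & SPEC =====
-- Pre_ excludes exactly the inputs where A does not return: empty pattern or output < 0
-- (infinite loop) and part ≤ -2 (IndexError on the one-element buffer).
def Pre_getP (pattern : List Int) (output : Int) (part : Int) (size : Int) : Prop :=
  pattern ≠ [] ∧ 0 ≤ output ∧ -1 ≤ part
instance (pattern : List Int) (output : Int) (part : Int) (size : Int) : Decidable (Pre_getP pattern output part size) := by unfold Pre_getP; infer_instance
def pvWitness_getP : List Int × Int × Int × Int := ([0, 1, 0, -1], 0, 5, 0)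

-- For part = -1 A returns pattern[0] by Python negative-index wraparound on a one-element
-- buffer, while B's modular formula returns pattern[len-1], the value of the periodic
-- pattern extended to index -1, which is the intended periodic rule.
def D_getP (pattern : List Int) (output : Int) (part : Int) (size : Int) : Prop :=
  part = -1 ∧ pattern.head? ≠ pattern.getLast?
instance (pattern : List Int) (output : Int) (part : Int) (size : Int) : Decidable (D_getP pattern output part size) := by unfold D_getP; infer_instance

def Spec_getP (pattern : List Int) (output : Int) (part : Int) (size : Int) (out : Int) : Prop := ¬ D_getP pattern output part size → out = getP_alt pattern output part size
instance (pattern : List Int) (output : Int) (part : Int) (size : Int) (out : Int) : Decidable (Spec_getP pattern output part size out) := by unfold Spec_getP; infer_instance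

def pvDiffWitness_getP : List Int × Int × Int × Int := ([0, 1, 0, -1], 0, -1, 0)
def pvDiffWitnessOut_getP : Int × Int := (0, -1)

-- ===== CLAIM (what is proved, stated in full; the proofs are below) =====
def Claim_unchanged_getP : Prop := ∀ (pattern : List Int) (output : Int) (part : Int) (size : Int), Dom_getP pattern output part size → Pre_getP pattern output part size → Spec_getP pattern output part size (getP pattern output part size)
def Claim_changed_getP : Prop := Dom_getP (pvDiffWitness_getP.1) (pvDiffWitness_getP.2.1) (pvDiffWitness_getP.2.2.1) (pvDiffWitness_getP.2.2.2) ∧ Pre_getP (pvDiffWitness_getP.1) (pvDiffWitness_getP.2.1) (pvDiffWitness_getP.2.2.1) (pvDiffWitness_getP.2.2.2) ∧ D_getP (pvDiffWitness_getP.1) (pvDiffWitness_getP.2.1) (pvDiffWitness_getP.2.2.1) (pvDiffWitness_getP.2.2.2) ∧ getP (pvDiffWitness_getP.1) (pvDiffWitness_getP.2.1) (pvDiffWitness_getP.2.2.1) (pvDiffWitness_getP.2.2.2) = pvDiffWitnessOut_getP.1 ∧ getP_alt (pvDiffWitness_getP.1) (pvDiffWitness_getP.2.1) (pvDiffWitness_getP.2.2.1)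 (pvDiffWitness_getP.2.2.2) = pvDiffWitnessOut_getP.2 ∧ pvDiffWitnessOut_getP.1 ≠ pvDiffWitnessOut_getP.2
def Claim_exact_getP : Prop := ∀ (pattern : List Int) (output : Int) (part : Int) (size : Int), Dom_getP pattern output part size → Pre_getP pattern output part size → D_getP pattern output part size → getP pattern output part size ≠ getP_alt pattern output part size
-- ===== LEMMAS AND PROOFS =====

theorem getPInner_spec (p part : Int) (hpart : 0 ≤ part) :
    ∀ (n : Nat) (acc : List Int), (acc.length : Int) ≤ part →
    getPInner p part acc n =
      if ((acc.length : Int) + n ≤ part) then Sum.inl (acc ++ List.replicate n p)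
      else Sum.inr p := by
  intro n
  induction n with
  | zero => intro acc h; simp only [getPInner, Nat.cast_zero, add_zero, if_pos h, List.replicate_zero, List.append_nil]
  | succ n ih =>
    intro acc h
    simp only [getPInner]
    by_cases hgt : ((acc ++ [p]).length : Int) > part
    · rw [if_pos hgt]
      have heq : (acc.length : Int) = part := by
        simp only [List.length_append, List.length_singleton, Nat.cast_add, Nat.cast_one] at hgt
        omega
      have hget : PySem.List.pyGet? (acc ++ [p]) part = some p := by
        rw [← heq]; exact PySem.List.pyGet?_append_length (pre := acc) (y := p) (ys := [])
      rw [hget, if_neg (by push_cast; omega)]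
      rfl
    · rw [if_neg hgt]
      have h' : ((acc ++ [p]).length : Int) ≤ part := by omega
      rw [ih (acc ++ [p]) h']
      simp only [List.length_append, List.length_singleton, Nat.cast_add, Nat.cast_one] at *
      by_cases hc : (acc.length : Int) + 1 + n ≤ part
      · rw [if_pos hc, if_pos (by push_cast at *; omega)]
        rw [List.append_assoc]
        congr 1
      · rw [if_neg hc, if_neg (by push_cast at *; omega)]
        try rfl

theorem getPMid_spec (part output : Int) (hpart : 0 ≤ part) (ho : 0 ≤ output) :
    ∀ (ps acc : List Int), (acc.length : Int) ≤ part →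
    getPMid part output acc ps =
      if ((acc.length : Int) + ps.length * (output + 1).toNat ≤ part) then
        Sum.inl (acc ++ ps.flatMap (fun q => List.replicate (output + 1).toNat q))
      else Sum.inr (ps.getD ((part - acc.length).toNat / (output + 1).toNat) 0) := by
  intro ps
  induction ps with
  | nil =>
    intro acc h
    simp only [getPMid, List.length_nil, Nat.cast_zero, zero_mul, add_zero, if_pos h,
      List.flatMap_nil, List.append_nil]
  | cons q qs ih =>
    intro acc h
    have hc0 : 0 < (output + 1).toNat := by omega
    simp only [getPMid]
    rw [getPInner_spec q part hpart ((output + 1).toNat) acc h]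
    by_cases hfit : (acc.length : Int) + ((output + 1).toNat : Int) ≤ part
    · rw [if_pos hfit]
      dsimp only
      rw [ih (acc ++ List.replicate (output + 1).toNat q)
        (by simp only [List.length_append, List.length_replicate]; push_cast; push_cast at hfit; omega)]
      split_ifs with h1 h2 h3
      · simp [List.flatMap_cons, List.append_assoc]
      · exfalso
        simp only [List.length_append, List.length_replicate, List.length_cons] at h1 h2
        push_cast at h1 h2
        nlinarith
      · exfalso
        simp only [List.length_append, List.length_replicate, List.length_cons] at h1 h3
        push_cast at h1 h3
        nlinarith
      · have hlen : ((acc ++ List.replicate (output + 1).toNat q).length : Int)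
            = (acc.length : Int) + ((output + 1).toNat : Int) := by
          simp only [List.length_append, List.length_replicate]; push_cast; ring
        rw [hlen]
        have e : (part - (acc.length : Int)).toNat
            = (part - (acc.length : Int) - ((output + 1).toNat : Int)).toNat + (output + 1).toNat := by
          omega
        have e2 : part - ((acc.length : Int) + ((output + 1).toNat : Int))
            = part - (acc.length : Int) - ((output + 1).toNat : Int) := by ring
        rw [e2, e, Nat.add_div_right _ hc0, List.getD_cons_succ]
    · rw [if_neg hfit]
      dsimp only
      have hcmul : ((output + 1).toNat : Int) ≤ ((q :: qs).length : Int) * ((output + 1).toNat : Int) := by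
        have : (1 : Int) ≤ ((q :: qs).length : Int) := by push_cast [List.length_cons]; omega
        nlinarith
      rw [if_neg (by push_cast at hcmul ⊢; push_cast at hfit; nlinarith)]
      have e : (part - (acc.length : Int)).toNat / (output + 1).toNat = 0 :=
        Nat.div_eq_of_lt (by omega)
      rw [e, List.getD_cons_zero]

theorem getPOuter_spec (pattern : List Int) (output part : Int)
    (hL : pattern ≠ []) (ho : 0 ≤ output) (hpart : 0 ≤ part) :
    ∀ (fuel : Nat) (acc : List Int), (acc.length : Int) ≤ part →
    part < (acc.length : Int) + ((fuel * (pattern.length * (output + 1).toNat) : Nat) : Int) →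
    getPOuter pattern output part acc fuel =
      pattern.getD (((part - acc.length).toNat / (output + 1).toNat) % pattern.length) 0 := by
  intro fuel
  induction fuel with
  | zero => intro acc hle hlt; exfalso; push_cast at hlt; omega
  | succ fuel ih =>
    intro acc hle hlt
    have hc0 : 0 < (output + 1).toNat := by omega
    have hL0 : 0 < pattern.length := List.length_pos_of_ne_nil hL
    simp only [getPOuter]
    rw [getPMid_spec part output hpart ho pattern acc hle]
    by_cases hall : (acc.length : Int) + pattern.length * (output + 1).toNat ≤ part
    · rw [if_pos hall]
      dsimp only
      have hallN : (acc.length : Int) + ((pattern.length * (output + 1).toNat : Nat) : Int) ≤ part := by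
        push_cast
        push_cast at hall
        linarith
      have hltN : part < (acc.length : Int) + ((pattern.length * (output + 1).toNat : Nat) : Int)
          + ((fuel * (pattern.length * (output + 1).toNat) : Nat) : Int) := by
        push_cast
        push_cast at hlt
        ring_nf
        ring_nf at hlt
        linarith
      have hflen : (acc ++ pattern.flatMap fun x => List.replicate (output + 1).toNat x).length
          = acc.length + pattern.length * (output + 1).toNat := by
        simp [List.length_append, List.length_flatMap, List.map_const',
          List.sum_replicate, smul_eq_mul]
      rw [ih _ (by rw [hflen]; push_cast at hallN ⊢; omega)
            (by rw [hflen]; push_cast at hltN ⊢; omega)]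
      congr 1
      rw [hflen]
      set K := pattern.length * (output + 1).toNat with hK
      have em : (part - ((acc.length : Int))).toNat
          = (part - (((acc.length + K : Nat)) : Int)).toNat + K := by
        push_cast at hallN ⊢
        omega
      rw [em, hK, Nat.add_mul_div_right _ _ hc0, Nat.add_mod_right]
    · rw [if_neg hall]
      dsimp only
      have hlt2 : (part - (acc.length : Int)).toNat < pattern.length * (output + 1).toNat := by
        have h2i : (((part - (acc.length : Int)).toNat : Nat) : Int)
            < ((pattern.length * (output + 1).toNat : Nat) : Int) := by
          rw [Int.toNat_of_nonneg (by omega)]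
          push_cast
          push_cast at hall
          linarith
        exact_mod_cast h2i
      have hdiv : (part - (acc.length : Int)).toNat / (output + 1).toNat < pattern.length :=
        Nat.div_lt_of_lt_mul (by rw [Nat.mul_comm] at hlt2; exact hlt2)
      rw [Nat.mod_eq_of_lt hdiv]

theorem getP_neg_one (q : Int) (qs : List Int) (output size : Int) (ho : 0 ≤ output) :
    getP (q :: qs) output (-1) size = q := by
  show getPOuter (q :: qs) output (-1) [] 2 = q
  obtain ⟨n, hn⟩ : ∃ n, (output + 1).toNat = n + 1 := ⟨output.toNat, by omega⟩
  simp only [getPOuter, getPMid, hn, getPInner, List.nil_append]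
  rw [if_pos (by simp)]
  rw [PySem.List.pyGet?_neg_one]
  simp

theorem getP_alt_neg_one (pattern : List Int) (output size : Int) (hL : pattern ≠ [])
    (ho : 0 ≤ output) : getP_alt pattern output (-1) size = pattern.getLast hL := by
  unfold getP_alt
  have hb : (0 : Int) < output + 1 := by omega
  have hL0 : 0 < pattern.length := List.length_pos_of_ne_nil hL
  have hf : PySem.Int.floordiv (-1) (output + 1) = -1 := by
    rw [PySem.Int.floordiv_eq_iff_of_pos hb]
    constructor <;> nlinarith
  have hf2 : PySem.Int.floordiv (-1) (pattern.length : Int) = -1 := by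
    rw [PySem.Int.floordiv_eq_iff_of_pos (by exact_mod_cast hL0)]
    constructor
    · have : (1 : Int) ≤ (pattern.length : Int) := by exact_mod_cast hL0
      nlinarith
    · nlinarith [show (0 : Int) < (pattern.length : Int) from by exact_mod_cast hL0]
  have hm : PySem.Int.mod (-1) (pattern.length : Int) = ((pattern.length - 1 : Nat) : Int) := by
    have h := PySem.Int.floordiv_mul_add_mod (-1) (pattern.length : Int)
    rw [hf2] at h
    push_cast [Nat.cast_sub (by omega : 1 ≤ pattern.length)]
    omega
  rw [hf, hm, PySem.List.pyGet?_natCast, ← List.getLast?_eq_getElem?,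
    List.getLast?_eq_getLast hL]
  rfl

-- ===== VERDICT (by name: the statement is the Claim_ definition above) =====
theorem getP_spec : Claim_unchanged_getP := by
  intro pattern output part size hdom hpre hD
  obtain ⟨hL, ho, hp1⟩ := hpre
  have hc0 : 0 < (output + 1).toNat := by omega
  have hL0 : 0 < pattern.length := List.length_pos_of_ne_nil hL
  rcases eq_or_lt_of_le hp1 with hneg | hpos
  · obtain ⟨q, qs, rfl⟩ := List.exists_cons_of_ne_nil hL
    have hp : part = -1 := hneg.symm
    subst hp
    rw [getP_neg_one q qs output size ho, getP_alt_neg_one _ output size hL ho]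
    have hhl : (q :: qs).head? = (q :: qs).getLast? := by
      by_contra hne
      exact hD ⟨rfl, hne⟩
    rw [List.getLast?_eq_getLast hL, List.head?_cons] at hhl
    exact Option.some.inj hhl
  · have hp0 : 0 ≤ part := by omega
    have hA : getP pattern output part size
        = pattern.getD ((part.toNat / (output + 1).toNat) % pattern.length) 0 := by
      show getPOuter pattern output part [] (part.toNat + 2)
        = pattern.getD ((part.toNat / (output + 1).toNat) % pattern.length) 0
      rw [getPOuter_spec pattern output part hL ho hp0 (part.toNat + 2) []
        (by simp; omega)
        (by
          have hm1 : part.toNat + 2 ≤ (part.toNat + 2) * (pattern.length * (output + 1).toNat) :=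
            Nat.le_mul_of_pos_right _ (Nat.mul_pos hL0 hc0)
          simp only [List.length_nil, Nat.cast_zero, zero_add]
          omega)]
      simp
    have e1 : PySem.Int.floordiv part (output + 1) = ((part.toNat / (output + 1).toNat : Nat) : Int) := by
      conv_lhs => rw [← Int.toNat_of_nonneg hp0, ← Int.toNat_of_nonneg (show (0 : Int) ≤ output + 1 by omega)]
      exact PySem.Int.floordiv_natCast _ _
    show getP pattern output part size = getP_alt pattern output part size
    rw [hA]
    unfold getP_alt
    rw [e1, PySem.Int.mod_natCast, PySem.List.pyGet?_natCast, List.getD_eq_getElem?_getD]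

theorem getP_changed : Claim_changed_getP := by unfold Claim_changed_getP; decide

theorem getP_tight : Claim_exact_getP := by
  intro pattern output part size hdom hpre hD
  obtain ⟨hL, ho, _⟩ := hpre
  obtain ⟨hp, hne⟩ := hD
  subst hp
  obtain ⟨q, qs, rfl⟩ := List.exists_cons_of_ne_nil hL
  rw [getP_neg_one q qs output size ho, getP_alt_neg_one _ output size hL ho]
  intro heq
  apply hne
  rw [List.head?_cons, List.getLast?_eq_getLast hL]
  exact congrArg some heq
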